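-- pv_equiv track=rewrite | github.com/QTank/mRNACodonOptimization | src/util.py | get_neighbour_repetition
-- ===== SOURCE A (Python) =====
-- def get_neighbour_repetition(codon1, codon2):
--     if not codon1 or not codon2:
--         return 0
--
--     last_base = codon1[-1]
--     if codon2[0] != last_base:
--         return 0
--
--     left_count = 1
--     for i in range(len(codon1) - 2, -1, -1):
--         if codon1[i] == last_base:
--             left_count += 1
--         else:
--             break
--
--     right_count = 1
--     for base in codon2[1:]:
--         if base == last_base:
--             right_count += 1
--         else:
--             break
--
--     total_repeat = left_count + right_count
--     return total_repeat
-- ===== SOURCE B (Python) =====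
-- def get_neighbour_repetition(codon1, codon2):
--     if not codon1 or not codon2:
--         return 0
--     s = codon1 + codon2
--     j = len(codon1)  # junction lies between indices j-1 and j
--     start = 0
--     while start < len(s):
--         end = start
--         while end < len(s) and s[end] == s[start]:
--             end += 1
--         if start < j and j < end:  # this maximal run spans the junction
--             return end - start
--         start = end
--     return 0
-- ===== Notes on version B (the rewrite author's own statement) =====
-- stated objective: alternative
-- what changed: Instead of counting the trailing run of codon1 and the leading run of codon2 separately from the junction outward, B concatenates the two codons and performs one run-length scan over the concatenation, returning the length of the maximal run that spans the junction index (0 if no run spans it), with no guard on codon2[0] vs codon1[-1] at all.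
import Mathlib
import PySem

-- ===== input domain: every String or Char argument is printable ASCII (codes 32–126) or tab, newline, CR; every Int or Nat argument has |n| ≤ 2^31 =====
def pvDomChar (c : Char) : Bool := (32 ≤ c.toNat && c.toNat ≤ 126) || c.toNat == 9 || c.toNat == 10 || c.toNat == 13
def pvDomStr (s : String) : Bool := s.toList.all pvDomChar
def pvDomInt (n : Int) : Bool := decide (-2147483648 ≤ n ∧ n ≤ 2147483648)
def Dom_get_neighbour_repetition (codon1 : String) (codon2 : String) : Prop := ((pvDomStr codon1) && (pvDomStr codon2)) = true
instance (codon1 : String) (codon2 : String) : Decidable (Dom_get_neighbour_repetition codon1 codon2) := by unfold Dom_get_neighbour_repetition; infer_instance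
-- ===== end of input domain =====

-- B replaces A's two outward directional counting loops with a single run-length scan of
-- the concatenation, returning the length of the maximal run spanning the junction
-- (objective: alternative algorithm, same cost).

-- ===== PORT A =====
-- the loop 'for i in range(len(codon1)-2, -1, -1): if codon1[i]==last: left+=1 else break',
-- as structural recursion on the number of remaining indices (m = next index + 1)
def pvLeftLoop (cs : List Char) (last : Char) : Nat → Int → Int
  | 0, acc => acc
  | m + 1, acc => if cs.getD m ' ' == last then pvLeftLoop cs last m (acc + 1) else acc

-- the loop 'for base in codon2[1:]: if base==last: right+=1 else break'
def pvRightLoop (last : Char) : List Char → Int → Int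
  | [], acc => acc
  | c :: rest, acc => if c == last then pvRightLoop last rest (acc + 1) else acc

def get_neighbour_repetition (codon1 : String) (codon2 : String) : Int :=
  let cs1 := codon1.toList
  let cs2 := codon2.toList
  if cs1 = [] ∨ cs2 = [] then 0
  else
    let last_base := PySem.List.pyGetD cs1 (-1) ' '
    if PySem.List.pyGetD cs2 0 ' ' ≠ last_base then 0
    else
      let left_count := pvLeftLoop cs1 last_base (cs1.length - 1) 1
      let right_count := pvRightLoop last_base (PySem.List.slice cs2 (some 1) none) 1
      left_count + right_count

-- ===== PORT B =====
-- the outer 'while start < len(s)' loop of Source B; the inner 'while end < len(s) and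
-- s[end] == s[start]' advance is the takeWhile run, 'start = end' the dropWhile skip
def pvRuns (j : Int) : List Char → Int → Int
  | [], _ => 0
  | c :: rest, start =>
    let k := (rest.takeWhile (· == c)).length
    if start < j ∧ j < start + 1 + k then (1 : Int) + k
    else pvRuns j (rest.dropWhile (· == c)) (start + 1 + k)
termination_by l _ => l.length
decreasing_by
  exact Nat.lt_succ_of_le (List.length_dropWhile_le _ _)

def get_neighbour_repetition_alt (codon1 : String) (codon2 : String) : Int :=
  let cs1 := codon1.toList
  let cs2 := codon2.toList
  if cs1 = [] ∨ cs2 = [] then 0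
  else pvRuns (cs1.length : Int) (cs1 ++ cs2) 0

-- ===== PRECONDITION & SPEC =====
def Spec_get_neighbour_repetition (codon1 : String) (codon2 : String) (out : Int) : Prop := out = get_neighbour_repetition_alt codon1 codon2
instance (codon1 : String) (codon2 : String) (out : Int) : Decidable (Spec_get_neighbour_repetition codon1 codon2 out) := by unfold Spec_get_neighbour_repetition; infer_instance

-- ===== CLAIM (what is proved, stated in full; the proofs are below) =====
def Claim_equal_get_neighbour_repetition : Prop := ∀ (codon1 : String) (codon2 : String), Dom_get_neighbour_repetition codon1 codon2 → Spec_get_neighbour_repetition codon1 codon2 (get_neighbour_repetition codon1 codon2)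

-- ===== LEMMAS AND PROOFS =====

theorem pvRightLoop_eq (last : Char) : ∀ (l : List Char) (acc : Int),
    pvRightLoop last l acc = acc + ((l.takeWhile (· == last)).length : Int) := by
  intro l
  induction l with
  | nil => intro acc; simp [pvRightLoop]
  | cons c rest ih =>
    intro acc
    by_cases h : c == last
    · simp [pvRightLoop, List.takeWhile, h, ih]; ring
    · simp [pvRightLoop, List.takeWhile, h]

theorem pvLeftLoop_eq (last : Char) : ∀ (ys rest : List Char) (acc : Int),
    pvLeftLoop (ys ++ rest) last ys.length acc
      = acc + ((ys.reverse.takeWhile (· == last)).length : Int) := by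
  intro ys
  induction ys using List.reverseRecOn with
  | nil => intro rest acc; simp [pvLeftLoop]
  | append_singleton zs y ih =>
    intro rest acc
    have hget : (zs ++ [y] ++ rest).getD zs.length ' ' = y := by
      simp [List.getD, List.append_assoc]
    have hlen : (zs ++ [y]).length = zs.length + 1 := by simp
    rw [hlen]
    simp only [pvLeftLoop, List.append_assoc] at hget ⊢
    rw [hget]
    rcases eq_or_ne y last with h | h
    · subst h
      rw [if_pos (by simp)]
      rw [ih ([y] ++ rest) (acc + 1)]
      simp
      omega
    · rw [if_neg (by simp [h])]
      simp [h]

theorem pvRuns_past (j : Int) (l : List Char) (start : Int) (h : j ≤ start) : pvRuns j l start = 0 := by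
  fun_induction pvRuns j l start with
  | case1 => rfl
  | case2 c rest start hif => omega
  | case3 c rest start k hif ih =>
    refine ih ?_
    have hk : (0:Int) ≤ (k : Int) := Int.natCast_nonneg _
    omega

theorem pv_head?_dropWhile_ne (p : Char → Bool) : ∀ (l : List Char) (a : Char),
    (l.dropWhile p).head? = some a → p a = false := by
  intro l
  induction l with
  | nil => intro a h; simp at h
  | cons c r ih =>
    intro a h
    rw [List.dropWhile_cons] at h
    by_cases hc : p c
    · rw [if_pos hc] at h; exact ih a h
    · rw [if_neg hc] at h
      simp at h
      rw [← h]
      exact Bool.not_eq_true _ ▸ (by simpa using hc)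

theorem pvRuns_main (x : Char) (t' : List Char) (left m : Nat)
    (ht : ∀ c, t'.head? = some c → c ≠ x) (h1 : 1 ≤ left) (h2 : left ≤ m) :
    ∀ (n : Nat) (p : List Char), p.length = n → (∀ c, p.getLast? = some c → c ≠ x) →
    ∀ (start : Int),
    pvRuns (start + (p.length : Int) + (left : Int)) (p ++ List.replicate m x ++ t') start
      = if left < m then (m : Int) else 0 := by
  have htw2 : List.takeWhile (· == x) t' = [] := by
    cases t' with
    | nil => rfl
    | cons a b =>
      have : a ≠ x := ht a rfl
      simp [this]
  have hdw2 : List.dropWhile (· == x) t' = t' := by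
    cases t' with
    | nil => rfl
    | cons a b =>
      have : a ≠ x := ht a rfl
      simp [this]
  intro n
  induction n using Nat.strong_induction_on with
  | _ n ih =>
    intro p hn hp start
    match p with
    | [] =>
      obtain ⟨m', rfl⟩ : ∃ m', m = m' + 1 := ⟨m - 1, by omega⟩
      simp only [List.nil_append, List.replicate_succ, List.cons_append, List.length_nil]
      rw [pvRuns]
      have htw : List.takeWhile (· == x) (List.replicate m' x ++ t') = List.replicate m' x := by
        rw [List.takeWhile_append]
        simp [htw2]
      have hdw : List.dropWhile (· == x) (List.replicate m' x ++ t') = t' := by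
        rw [List.dropWhile_append]
        simp [hdw2]
      rw [htw, hdw]
      simp only [List.length_replicate]
      by_cases hlt : left < m' + 1
      · rw [if_pos (by push_cast; omega), if_pos hlt]
        push_cast; omega
      · rw [if_neg (by push_cast; omega), if_neg hlt]
        exact pvRuns_past _ _ _ (by push_cast; omega)
    | c :: rest =>
      rw [List.cons_append, List.cons_append, pvRuns]
      by_cases hdwe : List.dropWhile (· == c) rest = []
      · have hall : ∀ y ∈ rest, (y == c) = true := List.dropWhile_eq_nil_iff.mp hdwe
        have hcx : c ≠ x := by
          have hd : (c :: rest).getLast? = some ((c :: rest).getLast (by simp)) :=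
            List.getLast?_eq_some_getLast (by simp)
          have hmem := List.getLast_mem (l := c :: rest) (by simp)
          have heq : (c :: rest).getLast (by simp) = c := by
            rcases List.mem_cons.mp hmem with h | h
            · exact h
            · exact beq_iff_eq.mp (hall _ h)
          apply hp
          rw [hd, heq]
        have htwr : List.takeWhile (· == c) rest = rest := by
          rw [List.takeWhile_eq_self_iff]; exact hall
        have htw : List.takeWhile (· == c) (rest ++ List.replicate m x ++ t')
            = rest := by
          rw [List.append_assoc, List.takeWhile_append, htwr, if_pos rfl]
          obtain ⟨m', rfl⟩ : ∃ m', m = m' + 1 := ⟨m - 1, by omega⟩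
          rw [List.replicate_succ, List.cons_append, List.takeWhile_cons]
          simp [Ne.symm hcx]
        have hdw : List.dropWhile (· == c) (rest ++ List.replicate m x ++ t')
            = List.replicate m x ++ t' := by
          rw [List.append_assoc, List.dropWhile_append, hdwe]
          obtain ⟨m', rfl⟩ : ∃ m', m = m' + 1 := ⟨m - 1, by omega⟩
          simp only [List.isEmpty_nil, if_pos]
          rw [List.replicate_succ, List.cons_append, List.dropWhile_cons]
          simp [Ne.symm hcx]
        rw [htw, hdw]
        have hrec := ih 0 (by rw [← hn]; simp) [] rfl (by intro c h; simp at h) (start + 1 + rest.length)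
        simp only [List.length_nil, List.nil_append] at hrec
        have hnot : ¬(start < start + ((c :: rest).length : Int) + (left : Int) ∧
            start + ((c :: rest).length : Int) + (left : Int) < start + 1 + (rest.length : Int)) := by
          simp only [List.length_cons]
          push_cast
          omega
        rw [if_neg hnot, ← hrec]
        congr 1
        simp only [List.length_cons]
        push_cast; ring
      · set tw := List.takeWhile (· == c) rest with htw_def
        set dw := List.dropWhile (· == c) rest with hdw_def
        have hsplit : tw ++ dw = rest := List.takeWhile_append_dropWhile
        have htwlen : tw.length ≠ rest.length := by
          intro hcontra
          apply hdwe
          have := congrArg List.length hsplit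
          simp at this
          exact List.eq_nil_of_length_eq_zero (by omega)
        have htw : List.takeWhile (· == c) (rest ++ List.replicate m x ++ t') = tw := by
          rw [List.append_assoc, List.takeWhile_append, if_neg (by rw [← htw_def]; exact htwlen)]
        have hdw : List.dropWhile (· == c) (rest ++ List.replicate m x ++ t')
            = dw ++ (List.replicate m x ++ t') := by
          rw [List.append_assoc, List.dropWhile_append, if_neg (by simp [← hdw_def, hdwe])]
        rw [htw, hdw]
        have hlen : tw.length + dw.length = rest.length := by
          have := congrArg List.length hsplit; simpa using this
        have hdlast : dw.getLast? = some (dw.getLast hdwe) := List.getLast?_eq_some_getLast hdwe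
        have hplast : (c :: rest).getLast? = dw.getLast? := by
          have hr : rest.getLast? = dw.getLast? := by
            rw [← hsplit, List.getLast?_append, hdlast]; rfl
          have hc : (c :: rest) = [c] ++ rest := rfl
          rw [hc, List.getLast?_append, hr, hdlast]; rfl
        have hrec := ih dw.length (by simp [← hn]; omega) dw rfl
          (by intro d hd; apply hp d; rw [hplast]; exact hd) (start + 1 + tw.length)
        have hnot : ¬(start < start + ((c :: rest).length : Int) + (left : Int) ∧
            start + ((c :: rest).length : Int) + (left : Int) < start + 1 + (tw.length : Int)) := by
          simp only [List.length_cons]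
          push_cast
          omega
        rw [if_neg hnot, ← List.append_assoc, ← hrec]
        congr 1
        simp only [List.length_cons]
        push_cast; omega

-- ===== VERDICT (by name: the statement is the Claim_ definition above) =====
theorem get_neighbour_repetition_spec : Claim_equal_get_neighbour_repetition := by
  intro codon1 codon2 _
  unfold Spec_get_neighbour_repetition
  unfold get_neighbour_repetition get_neighbour_repetition_alt
  by_cases hnil : codon1.toList = [] ∨ codon2.toList = []
  · rw [if_pos hnil, if_pos hnil]
  · rw [if_neg hnil, if_neg hnil]
    obtain ⟨h1, h2⟩ := not_or.mp hnil
    obtain ⟨ys, x, hys⟩ := (List.eq_nil_or_concat codon1.toList).resolve_left h1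
    rw [List.concat_eq_append] at hys
    obtain ⟨c, t, hct⟩ := List.exists_cons_of_ne_nil h2
    rw [hys, hct, PySem.List.pyGetD_neg_one_append_singleton, PySem.List.pyGetD_zero_cons]
    -- shared decomposition of ys into p ++ replicate |tkL| x
    set tkL := ys.reverse.takeWhile (· == x) with htkL_def
    set p := (ys.reverse.dropWhile (· == x)).reverse with hp_def
    have htkrep : tkL = List.replicate tkL.length x := by
      refine List.eq_replicate_length.mpr (fun b hb => ?_)
      rw [htkL_def] at hb
      exact beq_iff_eq.mp (List.mem_takeWhile_imp (p := (· == x)) (l := ys.reverse) hb)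
    have hys_dec : ys = p ++ List.replicate tkL.length x := by
      have := List.takeWhile_append_dropWhile (p := (· == x)) (l := ys.reverse)
      calc ys = ys.reverse.reverse := by simp
        _ = (tkL ++ ys.reverse.dropWhile (· == x)).reverse := by rw [this]
        _ = p ++ tkL.reverse := by simp [hp_def]
        _ = p ++ List.replicate tkL.length x := by
              conv_lhs => rw [htkrep]
              rw [List.reverse_replicate]
    have hplast : ∀ d, p.getLast? = some d → d ≠ x := by
      intro d hd
      rw [hp_def, List.getLast?_reverse] at hd
      have := pv_head?_dropWhile_ne (· == x) ys.reverse d hd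
      simpa using this
    have hcs1 : ys ++ [x] = p ++ List.replicate (tkL.length + 1) x := by
      rw [hys_dec, List.replicate_add, List.append_assoc]
      simp
    have hcs1len : (ys ++ [x]).length = p.length + (tkL.length + 1) := by
      rw [hcs1]; simp
    rcases eq_or_ne c x with hcx | hcx
    · subst hcx
      rw [if_neg (fun h => h rfl)]
      -- A's side
      have hslice : PySem.List.slice (c :: t) (some 1) none = t := by simp [pysem]
      have hlenA : (ys ++ [c]).length - 1 = ys.length := by simp
      rw [hlenA, hslice, pvLeftLoop_eq, pvRightLoop_eq]
      -- B's side
      set tk2 := t.takeWhile (· == c) with htk2_def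
      set dw2 := t.dropWhile (· == c) with hdw2_def
      have htk2rep : tk2 = List.replicate tk2.length c := by
        refine List.eq_replicate_length.mpr (fun b hb => ?_)
        rw [htk2_def] at hb
        exact beq_iff_eq.mp (List.mem_takeWhile_imp (p := (· == c)) (l := t) hb)
      have hcs2 : c :: t = List.replicate (1 + tk2.length) c ++ dw2 := by
        rw [List.replicate_add]
        simp only [List.replicate_one, List.cons_append, List.nil_append]
        congr 1
        rw [← htk2rep]
        exact (List.takeWhile_append_dropWhile).symm
      have hfull : (ys ++ [c]) ++ (c :: t)
          = p ++ List.replicate ((tkL.length + 1) + (1 + tk2.length)) c ++ dw2 := by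
        rw [hcs1, hcs2, List.replicate_add (tkL.length + 1), List.append_assoc, List.append_assoc,
          List.append_assoc]
      have hdw2h : ∀ d, dw2.head? = some d → d ≠ c := by
        intro d hd
        have := pv_head?_dropWhile_ne (· == c) t d hd
        simpa using this
      rw [hfull]
      have hmain := pvRuns_main c dw2 (tkL.length + 1) ((tkL.length + 1) + (1 + tk2.length))
        hdw2h (by omega) (by omega) p.length p rfl hplast 0
      have hstart : (0 : Int) + (p.length : Int) + ((tkL.length + 1 : Nat) : Int)
          = ((ys ++ [c]).length : Int) := by
        rw [hcs1len]; push_cast; ring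
      rw [hstart] at hmain
      rw [hmain, if_pos (by omega)]
      push_cast; ring
    · rw [if_pos hcx]
      -- B's side: no run spans the junction
      have hfull : (ys ++ [x]) ++ (c :: t)
          = p ++ List.replicate (tkL.length + 1) x ++ (c :: t) := by
        rw [hcs1]
      rw [hfull]
      have hch : ∀ d, (c :: t).head? = some d → d ≠ x := by
        intro d hd; simp at hd; rw [← hd]; exact hcx
      have hmain := pvRuns_main x (c :: t) (tkL.length + 1) (tkL.length + 1)
        hch (by omega) (by omega) p.length p rfl hplast 0
      have hstart : (0 : Int) + (p.length : Int) + ((tkL.length + 1 : Nat) : Int)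
          = ((ys ++ [x]).length : Int) := by
        rw [hcs1len]; push_cast; ring
      rw [hstart] at hmain
      rw [hmain, if_neg (by omega)]
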